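-- pv_equiv track=rewrite | github.com/kanatakayasu/apriori-window | comparative_methods/runner/methods_lpfim.py | _build_intervals
-- ===== SOURCE A (Python) =====
-- from dataclasses import dataclass
-- from typing import Dict, Iterable, List, Sequence, Tuple
--
-- @dataclass
-- class _IntervalState:
--     start: int
--     end: int
--     count: int
--
-- def _build_intervals(
--     ts_list: List[int], sigma_count: int, minthd1: int, minthd2: int
-- ) -> List[Tuple[int, int]]:
--     if not ts_list:
--         return []
--
--     intervals: List[Tuple[int, int]] = []
--     st = _IntervalState(start=ts_list[0], end=ts_list[0], count=1)
--
--     for ts in ts_list[1:]: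
--         if ts - st.end < minthd1:
--             st.end = ts
--             st.count += 1
--             continue
--
--         # close old interval
--         if (st.end - st.start) >= minthd2 and st.count >= sigma_count:
--             intervals.append((st.start, st.end))
--
--         # start new interval
--         st = _IntervalState(start=ts, end=ts, count=1)
--
--     # close final interval
--     if (st.end - st.start) >= minthd2 and st.count >= sigma_count:
--         intervals.append((st.start, st.end))
--
--     return intervals
-- ===== SOURCE B (Python) =====
-- def _build_intervals(ts_list, sigma_count, minthd1, minthd2):
--     if not ts_list:
--         return []
--     n = len(ts_list)
--     cuts = [0] + [i + 1 for i in range(n - 1)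
--                   if ts_list[i + 1] - ts_list[i] >= minthd1] + [n]
--     return [(ts_list[i], ts_list[j - 1])
--             for i, j in zip(cuts, cuts[1:])
--             if ts_list[j - 1] - ts_list[i] >= minthd2 and j - i >= sigma_count]
-- ===== Notes on version B (the rewrite author's own statement) =====
-- stated objective: alternative
-- what changed: Replaces A's single stateful pass (mutable _IntervalState with interleaved close/reopen logic) by an index-arithmetic formulation: compute the list of cut positions where the adjacent gap reaches minthd1, then zip consecutive cuts and emit (ts_list[i], ts_list[j-1]) for each qualifying segment, with the count obtained as j-i instead of a maintained counter.
import Mathlib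
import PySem

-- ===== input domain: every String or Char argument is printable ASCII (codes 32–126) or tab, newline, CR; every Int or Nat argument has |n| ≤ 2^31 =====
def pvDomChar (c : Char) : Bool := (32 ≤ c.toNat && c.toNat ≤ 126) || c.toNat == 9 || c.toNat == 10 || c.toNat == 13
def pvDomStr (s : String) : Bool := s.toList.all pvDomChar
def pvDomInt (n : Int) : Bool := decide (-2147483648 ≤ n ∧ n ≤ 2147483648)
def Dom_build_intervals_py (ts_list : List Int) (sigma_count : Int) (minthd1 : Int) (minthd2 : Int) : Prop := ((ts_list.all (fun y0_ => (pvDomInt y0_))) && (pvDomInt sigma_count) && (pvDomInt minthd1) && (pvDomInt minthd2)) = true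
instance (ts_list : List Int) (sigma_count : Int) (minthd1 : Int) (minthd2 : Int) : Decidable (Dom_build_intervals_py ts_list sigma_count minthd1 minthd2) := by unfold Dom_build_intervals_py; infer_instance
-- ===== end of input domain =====

-- B drops A's stateful scan (mutable _IntervalState) for an index-arithmetic formulation:
-- compute the cut positions where the gap reaches minthd1, zip consecutive cuts, and emit
-- (ts[i], ts[j-1]) for qualifying segments (count = j-i); objective: alternative. Proven equal.

-- ===== PORT A =====
-- the for-loop over ts_list[1:], carrying A's state (intervals, st.start, st.end, st.count);
-- the [] case performs the final "close final interval" step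
def pvALoop (sigma_count minthd1 minthd2 : Int)
    (intervals : List (Int × Int)) (s e c : Int) : List Int → List (Int × Int)
  | [] => if e - s ≥ minthd2 ∧ c ≥ sigma_count then intervals ++ [(s, e)] else intervals
  | ts :: rest =>
    if ts - e < minthd1 then
      pvALoop sigma_count minthd1 minthd2 intervals s ts (c + 1) rest
    else
      pvALoop sigma_count minthd1 minthd2
        (if e - s ≥ minthd2 ∧ c ≥ sigma_count then intervals ++ [(s, e)] else intervals)
        ts ts 1 rest

def build_intervals_py (ts_list : List Int) (sigma_count : Int) (minthd1 : Int) (minthd2 : Int) : List (Int × Int) :=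
  match ts_list with
  | [] => []
  | t :: rest => pvALoop sigma_count minthd1 minthd2 [] t t 1 rest

-- ===== PORT B =====
-- body of B's second comprehension: a cut pair (i, j) ↦ (ts_list[i], ts_list[j-1]) if it
-- qualifies (indices are provably in range, so getD's default is never used; exact there)
def pvCutEmit (ts_list : List Int) (sigma_count minthd2 : Int) (p : Nat × Nat) : Option (Int × Int) :=
  if ts_list.getD (p.2 - 1) 0 - ts_list.getD p.1 0 ≥ minthd2 ∧ (p.2 : Int) - (p.1 : Int) ≥ sigma_count then
    some (ts_list.getD p.1 0, ts_list.getD (p.2 - 1) 0)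
  else none

-- cuts = [0] + [i+1 for i in range(n-1) if ts[i+1]-ts[i] >= minthd1] + [n];
-- result = [... for i, j in zip(cuts, cuts[1:]) if ...]
def build_intervals_py_alt (ts_list : List Int) (sigma_count : Int) (minthd1 : Int) (minthd2 : Int) : List (Int × Int) :=
  if ts_list.isEmpty then []
  else
    let n := ts_list.length
    let cuts : List Nat :=
      [0] ++ ((List.range (n - 1)).filter
                (fun i => decide (ts_list.getD (i + 1) 0 - ts_list.getD i 0 ≥ minthd1))).map (· + 1)
          ++ [n]
    (cuts.zip (cuts.drop 1)).filterMap (pvCutEmit ts_list sigma_count minthd2)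

-- ===== PRECONDITION & SPEC =====
def Spec_build_intervals_py (ts_list : List Int) (sigma_count : Int) (minthd1 : Int) (minthd2 : Int) (out : List (Int × Int)) : Prop := out = build_intervals_py_alt ts_list sigma_count minthd1 minthd2
instance (ts_list : List Int) (sigma_count : Int) (minthd1 : Int) (minthd2 : Int) (out : List (Int × Int)) : Decidable (Spec_build_intervals_py ts_list sigma_count minthd1 minthd2 out) := by unfold Spec_build_intervals_py; infer_instance

-- ===== CLAIM (what is proved, stated in full; the proofs are below) =====
def Claim_equal_build_intervals_py : Prop := ∀ (ts_list : List Int) (sigma_count : Int) (minthd1 : Int) (minthd2 : Int), Dom_build_intervals_py ts_list sigma_count minthd1 minthd2 → Spec_build_intervals_py ts_list sigma_count minthd1 minthd2 (build_intervals_py ts_list sigma_count minthd1 minthd2)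

-- ===== LEMMAS AND PROOFS =====

-- proof-only intermediate: the gap runs of the input (B itself never builds them)
def pvRuns (minthd1 : Int) (t : Int) : List Int → List (List Int)
  | [] => [[t]]
  | u :: rs =>
    if u - t < minthd1 then
      match pvRuns minthd1 u rs with
      | [] => [[t]]          -- unreachable: pvRuns never returns []
      | g :: gs => (t :: g) :: gs
    else
      [t] :: pvRuns minthd1 u rs

def pvEmit (sigma_count minthd2 : Int) (g : List Int) : Option (Int × Int) :=
  if g.getLastD 0 - g.headD 0 ≥ minthd2 ∧ (g.length : Int) ≥ sigma_count then
    some (g.headD 0, g.getLastD 0)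
  else none

-- emissions for a run list whose FIRST run is still open with recorded start s, count base c
def pvEmitRuns (sigma_count minthd2 s c : Int) : List (List Int) → List (Int × Int)
  | [] => []
  | g :: gs =>
    (if g.getLastD 0 - s ≥ minthd2 ∧ c - 1 + (g.length : Int) ≥ sigma_count then
        [(s, g.getLastD 0)] else []) ++
    gs.filterMap (pvEmit sigma_count minthd2)

-- recursive characterisation of B's break positions
def pvBreaks (minthd1 : Int) : List Int → List Nat
  | [] => []
  | [_] => []
  | t :: u :: rs =>
    (if u - t ≥ minthd1 then [0] else []) ++ (pvBreaks minthd1 (u :: rs)).map (· + 1)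

def pvPairs (c : List Nat) : List (Nat × Nat) := c.zip (c.drop 1)

-- emissions for a pair list whose FIRST segment is still open with start value s, count base c
def pvEmitPairs (ts : List Int) (sigma_count minthd2 s c : Int) : List (Nat × Nat) → List (Int × Int)
  | [] => []
  | p :: ps =>
    (if ts.getD (p.2 - 1) 0 - s ≥ minthd2 ∧ c - 1 + ((p.2 : Int) - (p.1 : Int)) ≥ sigma_count then
        [(s, ts.getD (p.2 - 1) 0)] else []) ++
    ps.filterMap (pvCutEmit ts sigma_count minthd2)

lemma pvRuns_head (minthd1 t : Int) (rest : List Int) :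
    ∃ g gs, pvRuns minthd1 t rest = (t :: g) :: gs := by
  cases rest with
  | nil => exact ⟨[], [], rfl⟩
  | cons u rs =>
    simp only [pvRuns]
    split_ifs with h
    · obtain ⟨g, gs, hg⟩ := pvRuns_head minthd1 u rs
      rw [hg]
      exact ⟨u :: g, gs, rfl⟩
    · exact ⟨[], pvRuns minthd1 u rs, rfl⟩

-- A's loop invariant
lemma pvALoop_eq (sigma_count minthd1 minthd2 : Int) :
    ∀ (rest : List Int) (acc : List (Int × Int)) (s e c : Int),
      pvALoop sigma_count minthd1 minthd2 acc s e c rest =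
        acc ++ pvEmitRuns sigma_count minthd2 s c (pvRuns minthd1 e rest) := by
  intro rest
  induction rest with
  | nil =>
    intro acc s e c
    simp only [pvALoop, pvRuns, pvEmitRuns, List.filterMap_nil, List.append_nil]
    have he : ([e] : List Int).getLastD 0 = e := rfl
    rw [he]
    have hc : ((e : Int) - s ≥ minthd2 ∧ c - 1 + (([e].length : Nat) : Int) ≥ sigma_count)
        ↔ (e - s ≥ minthd2 ∧ c ≥ sigma_count) := by
      simp only [List.length_cons, List.length_nil]
      constructor <;> (rintro ⟨h1, h2⟩; exact ⟨h1, by omega⟩)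
    rw [if_congr (Iff.symm hc) rfl rfl]
    split_ifs <;> simp
  | cons ts rs ih =>
    intro acc s e c
    simp only [pvALoop, pvRuns]
    split_ifs with h hcl
    · rw [ih]
      obtain ⟨g, gs, hg⟩ := pvRuns_head minthd1 ts rs
      rw [hg]
      simp only [pvEmitRuns]
      have hlast : (e :: ts :: g).getLastD 0 = (ts :: g).getLastD 0 := by simp
      have hc : ((ts :: g).getLastD 0 - s ≥ minthd2 ∧ c + 1 - 1 + (((ts :: g).length : Nat) : Int) ≥ sigma_count)
          ↔ ((e :: ts :: g).getLastD 0 - s ≥ minthd2 ∧ c - 1 + (((e :: ts :: g).length : Nat) : Int) ≥ sigma_count) := by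
        rw [hlast]
        simp only [List.length_cons]
        constructor <;> (rintro ⟨h1, h2⟩; exact ⟨h1, by push_cast at *; omega⟩)
      rw [if_congr hc rfl rfl, hlast]
    · rw [ih]
      obtain ⟨g, gs, hg⟩ := pvRuns_head minthd1 ts rs
      rw [hg]
      simp only [pvEmitRuns, List.filterMap_cons]
      have hfst : pvEmit sigma_count minthd2 (ts :: g) =
          if (ts :: g).getLastD 0 - ts ≥ minthd2 ∧ (1 : Int) - 1 + (((ts :: g).length : Nat) : Int) ≥ sigma_count then
            some (ts, (ts :: g).getLastD 0)
          else none := by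
        simp only [pvEmit, List.headD_cons]
        have : ((1 : Int) - 1 + (((ts :: g).length : Nat) : Int) ≥ sigma_count) ↔ ((((ts :: g).length : Nat) : Int) ≥ sigma_count) := by omega
        rw [if_congr (and_congr Iff.rfl (Iff.symm this)) rfl rfl]
      have hcl' : ([e] : List Int).getLastD 0 - s ≥ minthd2 ∧ c - 1 + (([e].length : Nat) : Int) ≥ sigma_count := by
        simp only [List.getLastD, List.length_cons, List.length_nil]
        exact ⟨hcl.1, by push_cast; omega⟩
      rw [if_pos hcl', hfst]
      by_cases hq : (ts :: g).getLastD 0 - ts ≥ minthd2 ∧ (1 : Int) - 1 + (((ts :: g).length : Nat) : Int) ≥ sigma_count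
      · rw [if_pos hq, if_pos hq]
        simp [List.getLastD]
      · rw [if_neg hq, if_neg hq]
        simp [List.getLastD]
    · rw [ih]
      obtain ⟨g, gs, hg⟩ := pvRuns_head minthd1 ts rs
      rw [hg]
      simp only [pvEmitRuns, List.filterMap_cons]
      have hcl' : ¬ (([e] : List Int).getLastD 0 - s ≥ minthd2 ∧ c - 1 + (([e].length : Nat) : Int) ≥ sigma_count) := by
        simp only [List.getLastD, List.length_cons, List.length_nil]
        intro hco
        exact hcl ⟨hco.1, by omega⟩
      rw [if_neg hcl']
      have hfst : pvEmit sigma_count minthd2 (ts :: g) =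
          if (ts :: g).getLastD 0 - ts ≥ minthd2 ∧ (1 : Int) - 1 + (((ts :: g).length : Nat) : Int) ≥ sigma_count then
            some (ts, (ts :: g).getLastD 0)
          else none := by
        simp only [pvEmit, List.headD_cons]
        have : ((1 : Int) - 1 + (((ts :: g).length : Nat) : Int) ≥ sigma_count) ↔ ((((ts :: g).length : Nat) : Int) ≥ sigma_count) := by omega
        rw [if_congr (and_congr Iff.rfl (Iff.symm this)) rfl rfl]
      rw [hfst]
      by_cases hq : (ts :: g).getLastD 0 - ts ≥ minthd2 ∧ (1 : Int) - 1 + (((ts :: g).length : Nat) : Int) ≥ sigma_count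
      · rw [if_pos hq, if_pos hq]
        simp
      · rw [if_neg hq, if_neg hq]

-- run-list emissions at the initial state (s = head, c = 1) are the plain filterMap
lemma pvRunsEmit_init (sigma_count minthd1 minthd2 t : Int) (rest : List Int) :
    (pvRuns minthd1 t rest).filterMap (pvEmit sigma_count minthd2) =
      pvEmitRuns sigma_count minthd2 t 1 (pvRuns minthd1 t rest) := by
  obtain ⟨g, gs, hg⟩ := pvRuns_head minthd1 t rest
  rw [hg]
  simp only [List.filterMap_cons, pvEmitRuns]
  have hfst : pvEmit sigma_count minthd2 (t :: g) =
      if (t :: g).getLastD 0 - t ≥ minthd2 ∧ (1 : Int) - 1 + (((t :: g).length : Nat) : Int) ≥ sigma_count then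
        some (t, (t :: g).getLastD 0)
      else none := by
    simp only [pvEmit, List.headD_cons]
    have : ((1 : Int) - 1 + (((t :: g).length : Nat) : Int) ≥ sigma_count) ↔ ((((t :: g).length : Nat) : Int) ≥ sigma_count) := by omega
    rw [if_congr (and_congr Iff.rfl (Iff.symm this)) rfl rfl]
  rw [hfst]
  by_cases hq : (t :: g).getLastD 0 - t ≥ minthd2 ∧ (1 : Int) - 1 + (((t :: g).length : Nat) : Int) ≥ sigma_count
  · rw [if_pos hq, if_pos hq]; simp
  · rw [if_neg hq, if_neg hq]; simp

-- the port's range/filter expression computes pvBreaks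
lemma pvBreaks_eq (minthd1 : Int) :
    ∀ ts : List Int,
      (List.range (ts.length - 1)).filter
          (fun i => decide (ts.getD (i + 1) 0 - ts.getD i 0 ≥ minthd1)) =
        pvBreaks minthd1 ts
  | [] => rfl
  | [_] => rfl
  | t :: u :: rs => by
    have ih := pvBreaks_eq minthd1 (u :: rs)
    simp only [List.length_cons, Nat.add_sub_cancel] at ih ⊢
    rw [List.range_succ_eq_map, List.filter_cons, List.filter_map]
    have hcomp : ((fun i => decide ((t :: u :: rs).getD (i + 1) 0 - (t :: u :: rs).getD i 0 ≥ minthd1)) ∘ Nat.succ)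
        = (fun i => decide ((u :: rs).getD (i + 1) 0 - (u :: rs).getD i 0 ≥ minthd1)) := by
      funext i
      simp
    rw [hcomp, ih]
    simp only [pvBreaks, List.getD_cons_succ, List.getD_cons_zero]
    split_ifs with h h2 h3 <;> simp_all

-- shifting every index by one and consing a new head leaves pvCutEmit unchanged
lemma pvShift (sigma_count minthd2 x : Int) (ts : List Int) :
    ∀ (ps : List (Nat × Nat)), (∀ p ∈ ps, 1 ≤ p.2) →
      (ps.map (fun p => (p.1 + 1, p.2 + 1))).filterMap (pvCutEmit (x :: ts) sigma_count minthd2) =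
        ps.filterMap (pvCutEmit ts sigma_count minthd2)
  | [], _ => rfl
  | p :: ps, h => by
    obtain ⟨i, j⟩ := p
    have hj : 1 ≤ j := h (i, j) (List.mem_cons_self ..)
    obtain ⟨j', rfl⟩ : ∃ j', j = j' + 1 := ⟨j - 1, by omega⟩
    have ih := pvShift sigma_count minthd2 x ts ps (fun q hq => h q (List.mem_cons_of_mem _ hq))
    simp only [List.map_cons, List.filterMap_cons, ih]
    have hemit : pvCutEmit (x :: ts) sigma_count minthd2 (i + 1, j' + 1 + 1) =
        pvCutEmit ts sigma_count minthd2 (i, j' + 1) := by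
      simp only [pvCutEmit, Nat.add_sub_cancel, List.getD_cons_succ]
      have : ((j' + 1 + 1 : Nat) : Int) - ((i + 1 : Nat) : Int) = ((j' + 1 : Nat) : Int) - (i : Int) := by
        push_cast; ring
      rw [this]
    rw [hemit]

lemma pvPairs_map (c : List Nat) :
    pvPairs (c.map (· + 1)) = (pvPairs c).map (fun p => (p.1 + 1, p.2 + 1)) := by
  simp only [pvPairs, ← List.map_drop, List.zip_map]
  congr 1

-- a head pair starting at index 0 is emitted plainly iff it is emitted with s = ts[0], c = 1
lemma pvPlainHead (sigma_count minthd2 : Int) (ts : List Int) (j : Nat) (ps : List (Nat × Nat)) :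
    (((0, j) :: ps).filterMap (pvCutEmit ts sigma_count minthd2)) =
      pvEmitPairs ts sigma_count minthd2 (ts.getD 0 0) 1 ((0, j) :: ps) := by
  simp only [List.filterMap_cons, pvEmitPairs]
  have hc : (ts.getD (j - 1) 0 - ts.getD 0 0 ≥ minthd2 ∧ ((j : Int) - ((0 : Nat) : Int)) ≥ sigma_count)
      ↔ (ts.getD (j - 1) 0 - ts.getD 0 0 ≥ minthd2 ∧ (1 : Int) - 1 + ((j : Int) - ((0 : Nat) : Int)) ≥ sigma_count) := by
    constructor <;> (rintro ⟨h1, h2⟩; exact ⟨h1, by omega⟩)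
  by_cases hq : ts.getD (j - 1) 0 - ts.getD 0 0 ≥ minthd2 ∧ ((j : Int) - ((0 : Nat) : Int)) ≥ sigma_count
  · rw [pvCutEmit, if_pos hq, if_pos (hc.mp hq)]; simp
  · rw [pvCutEmit, if_neg hq, if_neg (fun hx => hq (hc.mpr hx))]; simp

-- every element of B's cut tail is ≥ 1
lemma pvCutTail_pos (minthd1 : Int) (ts : List Int) (hts : ts ≠ []) :
    ∀ x ∈ (pvBreaks minthd1 ts).map (· + 1) ++ [ts.length], 1 ≤ x := by
  intro x hx
  rcases List.mem_append.mp hx with h | h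
  · obtain ⟨y, _, rfl⟩ := List.mem_map.mp h
    omega
  · simp only [List.mem_singleton] at h
    subst h
    cases ts with
    | nil => exact absurd rfl hts
    | cons a l => simp

-- MAIN: the cut-pair emissions equal the run emissions, first segment open with (s, c)
lemma pvMain (sigma_count minthd1 minthd2 : Int) :
    ∀ (rest : List Int) (e s c : Int),
      pvEmitPairs (e :: rest) sigma_count minthd2 s c
          (pvPairs (0 :: ((pvBreaks minthd1 (e :: rest)).map (· + 1) ++ [(e :: rest).length]))) =
        pvEmitRuns sigma_count minthd2 s c (pvRuns minthd1 e rest) := by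
  intro rest
  induction rest with
  | nil =>
    intro e s c
    simp only [pvBreaks, List.map_nil, List.nil_append, List.length_cons, List.length_nil,
      pvPairs, List.drop, List.zip, pvRuns, pvEmitRuns, pvEmitPairs, List.filterMap_nil,
      List.append_nil, List.zipWith]
    norm_num
  | cons u rs ih =>
    intro e s c
    by_cases hbr : u - e ≥ minthd1
    · -- a break right after e: close [e], start afresh at u
      have hruns : pvRuns minthd1 e (u :: rs) = [e] :: pvRuns minthd1 u rs := by
        simp only [pvRuns]
        rw [if_neg (by omega)]
      have hbrk : pvBreaks minthd1 (e :: u :: rs) =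
          0 :: (pvBreaks minthd1 (u :: rs)).map (· + 1) := by
        simp only [pvBreaks]
        rw [if_pos hbr]
        rfl
      set d : List Nat := (pvBreaks minthd1 (u :: rs)).map (· + 1) ++ [(u :: rs).length] with hd
      have hcuts : (pvBreaks minthd1 (e :: u :: rs)).map (· + 1) ++ [(e :: u :: rs).length] =
          1 :: d.map (· + 1) := by
        rw [hbrk]
        simp only [hd, List.map_cons, List.map_append, List.map_map, List.length_cons]
        rfl
      rw [hcuts]
      have hpairs : pvPairs (0 :: 1 :: d.map (· + 1)) =
          (0, 1) :: pvPairs ((0 :: d).map (· + 1)) := by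
        simp only [pvPairs, List.map_cons, List.drop]
        rfl
      rw [hpairs]
      -- d is nonempty; expose its head
      obtain ⟨d0, d', hd0⟩ : ∃ d0 d', d = d0 :: d' := by
        cases hB : pvBreaks minthd1 (u :: rs) with
        | nil => exact ⟨(u :: rs).length, [], by simp [hd, hB]⟩
        | cons b bs => exact ⟨b + 1, bs.map (· + 1) ++ [(u :: rs).length], by simp [hd, hB]⟩
      have hdpos : ∀ x ∈ d, 1 ≤ x := pvCutTail_pos minthd1 (u :: rs) (by simp)
      have hps_pos : ∀ p ∈ pvPairs (0 :: d), 1 ≤ p.2 := by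
        intro p hp
        exact hdpos p.2 ((List.of_mem_zip (by exact hp)).2)
      -- head emission + shifted tail
      simp only [pvEmitPairs]
      rw [pvPairs_map, pvShift sigma_count minthd2 e (u :: rs) _ hps_pos]
      rw [hd0]
      have hzip : pvPairs (0 :: d0 :: d') = (0, d0) :: pvPairs (d0 :: d') := rfl
      rw [hzip, pvPlainHead]
      rw [show ((u :: rs).getD 0 0 : Int) = u from rfl]
      have hihs := ih u u 1
      rw [show (pvBreaks minthd1 (u :: rs)).map (· + 1) ++ [(u :: rs).length] = d from rfl, hd0] at hihs
      rw [hzip] at hihs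
      rw [hihs, ← pvRunsEmit_init sigma_count minthd1 minthd2 u rs]
      rw [hruns]
      simp only [pvEmitRuns]
      have hc : ((e :: u :: rs).getD (1 - 1) 0 - s ≥ minthd2 ∧ c - 1 + (((1 : Nat) : Int) - ((0 : Nat) : Int)) ≥ sigma_count)
          ↔ (([e] : List Int).getLastD 0 - s ≥ minthd2 ∧ c - 1 + ((([e].length : Nat)) : Int) ≥ sigma_count) := by
        simp only [List.getLastD, List.length_cons, List.length_nil]
        constructor <;> (rintro ⟨h1, h2⟩; refine ⟨h1, ?_⟩) <;> (push_cast at *; omega)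
      by_cases hq : (e :: u :: rs).getD (1 - 1) 0 - s ≥ minthd2 ∧ c - 1 + (((1 : Nat) : Int) - ((0 : Nat) : Int)) ≥ sigma_count
      · rw [if_pos hq, if_pos (hc.mp hq)]
        simp [List.getLastD]
      · rw [if_neg hq, if_neg (fun hx => hq (hc.mpr hx))]
    · -- no break: the first run absorbs u
      have hruns : pvRuns minthd1 e (u :: rs) =
          match pvRuns minthd1 u rs with
          | [] => [[e]]
          | g :: gs => (e :: g) :: gs := by
        simp only [pvRuns]
        rw [if_pos (by omega)]
      have hbrk : pvBreaks minthd1 (e :: u :: rs) = (pvBreaks minthd1 (u :: rs)).map (· + 1) := by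
        simp only [pvBreaks]
        rw [if_neg hbr]
        rfl
      set d : List Nat := (pvBreaks minthd1 (u :: rs)).map (· + 1) ++ [(u :: rs).length] with hd
      have hcuts : (pvBreaks minthd1 (e :: u :: rs)).map (· + 1) ++ [(e :: u :: rs).length] =
          d.map (· + 1) := by
        rw [hbrk]
        simp only [hd, List.map_append, List.map_map, List.length_cons]
        rfl
      rw [hcuts]
      obtain ⟨k, d', hd0⟩ : ∃ k d', d = (k + 1) :: d' := by
        cases hB : pvBreaks minthd1 (u :: rs) with
        | nil => exact ⟨rs.length, [], by simp [hd, hB]⟩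
        | cons b bs => exact ⟨b, bs.map (· + 1) ++ [(u :: rs).length], by simp [hd, hB]⟩
      have hdpos : ∀ x ∈ d, 1 ≤ x := pvCutTail_pos minthd1 (u :: rs) (by simp)
      have hps_pos : ∀ p ∈ pvPairs ((k + 1) :: d'), 1 ≤ p.2 := by
        intro p hp
        have : p.2 ∈ d' := (List.of_mem_zip (by exact hp)).2
        exact hdpos p.2 (by rw [hd0]; exact List.mem_cons_of_mem _ this)
      rw [hd0]
      have hpairs : pvPairs (0 :: ((k + 1) :: d').map (· + 1)) =
          (0, k + 1 + 1) :: (pvPairs ((k + 1) :: d')).map (fun p => (p.1 + 1, p.2 + 1)) := by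
        rw [← pvPairs_map]
        rfl
      rw [hpairs]
      simp only [pvEmitPairs]
      rw [pvShift sigma_count minthd2 e (u :: rs) _ hps_pos]
      have hihs := ih u s (c + 1)
      rw [show (pvBreaks minthd1 (u :: rs)).map (· + 1) ++ [(u :: rs).length] = d from rfl, hd0] at hihs
      have hzip : pvPairs (0 :: (k + 1) :: d') = (0, k + 1) :: pvPairs ((k + 1) :: d') := rfl
      rw [hzip] at hihs
      simp only [pvEmitPairs] at hihs
      -- compare head conditions/values, then reuse IH
      obtain ⟨g, gs, hg⟩ := pvRuns_head minthd1 u rs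
      rw [hruns, hg]
      rw [hg] at hihs
      simp only [pvEmitRuns] at hihs ⊢
      have hgetd : (e :: u :: rs).getD (k + 1 + 1 - 1) 0 = (u :: rs).getD (k + 1 - 1) 0 := by
        simp only [Nat.add_sub_cancel, List.getD_cons_succ]
      have hcl : ((e :: u :: rs).getD (k + 1 + 1 - 1) 0 - s ≥ minthd2 ∧ c - 1 + (((k + 1 + 1 : Nat) : Int) - ((0 : Nat) : Int)) ≥ sigma_count)
          ↔ ((u :: rs).getD (k + 1 - 1) 0 - s ≥ minthd2 ∧ (c + 1) - 1 + (((k + 1 : Nat) : Int) - ((0 : Nat) : Int)) ≥ sigma_count) := by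
        rw [hgetd]
        constructor <;> (rintro ⟨h1, h2⟩; refine ⟨h1, ?_⟩) <;> (push_cast at *; omega)
      have hcr : ((u :: g).getLastD 0 - s ≥ minthd2 ∧ (c + 1) - 1 + ((((u :: g).length : Nat)) : Int) ≥ sigma_count)
          ↔ ((e :: u :: g).getLastD 0 - s ≥ minthd2 ∧ c - 1 + ((((e :: u :: g).length : Nat)) : Int) ≥ sigma_count) := by
        have : (e :: u :: g).getLastD 0 = (u :: g).getLastD 0 := by simp
        rw [this]
        simp only [List.length_cons]
        constructor <;> (rintro ⟨h1, h2⟩; refine ⟨h1, ?_⟩) <;> (push_cast at *; omega)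
      have hlast : (e :: u :: g).getLastD 0 = (u :: g).getLastD 0 := by simp
      by_cases hq : (u :: rs).getD (k + 1 - 1) 0 - s ≥ minthd2 ∧ (c + 1) - 1 + (((k + 1 : Nat) : Int) - ((0 : Nat) : Int)) ≥ sigma_count
      · rw [if_pos (hcl.mpr hq)]
        rw [if_pos hq] at hihs
        rw [hgetd]
        by_cases hq2 : (u :: g).getLastD 0 - s ≥ minthd2 ∧ (c + 1) - 1 + ((((u :: g).length : Nat)) : Int) ≥ sigma_count
        · rw [if_pos hq2] at hihs
          rw [if_pos (hcr.mp hq2), hlast]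
          exact hihs
        · rw [if_neg hq2] at hihs
          rw [if_neg (fun hx => hq2 (hcr.mpr hx))]
          exact hihs
      · rw [if_neg (fun hx => hq (hcl.mp hx))]
        rw [if_neg hq] at hihs
        by_cases hq2 : (u :: g).getLastD 0 - s ≥ minthd2 ∧ (c + 1) - 1 + ((((u :: g).length : Nat)) : Int) ≥ sigma_count
        · rw [if_pos hq2] at hihs
          rw [if_pos (hcr.mp hq2), hlast]
          exact hihs
        · rw [if_neg hq2] at hihs
          rw [if_neg (fun hx => hq2 (hcr.mpr hx))]
          exact hihs

-- ===== VERDICT (by name: the statement is the Claim_ definition above) =====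
theorem build_intervals_py_spec : Claim_equal_build_intervals_py := by
  intro ts_list sigma_count minthd1 minthd2 _
  unfold Spec_build_intervals_py
  cases ts_list with
  | nil => rfl
  | cons t rest =>
    rw [build_intervals_py_alt]
    simp only [List.isEmpty_cons, Bool.false_eq_true, if_false]
    rw [show ((t :: rest).length - 1) = rest.length from by simp]
    rw [show ((List.range rest.length).filter
          (fun i => decide ((t :: rest).getD (i + 1) 0 - (t :: rest).getD i 0 ≥ minthd1)))
        = pvBreaks minthd1 (t :: rest) from by
      have := pvBreaks_eq minthd1 (t :: rest)
      simpa using this]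
    set d : List Nat := (pvBreaks minthd1 (t :: rest)).map (· + 1) ++ [(t :: rest).length] with hd
    have hcuts : ([0] ++ (pvBreaks minthd1 (t :: rest)).map (· + 1) ++ [(t :: rest).length] : List Nat)
        = 0 :: d := by simp [hd]
    rw [hcuts]
    have hzip : ((0 :: d).zip ((0 :: d).drop 1)) = pvPairs (0 :: d) := rfl
    rw [hzip]
    obtain ⟨d0, d', hd0⟩ : ∃ d0 d', d = d0 :: d' := by
      cases hB : pvBreaks minthd1 (t :: rest) with
      | nil => exact ⟨(t :: rest).length, [], by simp [hd, hB]⟩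
      | cons b bs => exact ⟨b + 1, bs.map (· + 1) ++ [(t :: rest).length], by simp [hd, hB]⟩
    rw [hd0]
    rw [show pvPairs (0 :: d0 :: d') = (0, d0) :: pvPairs (d0 :: d') from rfl]
    rw [pvPlainHead]
    rw [show ((t :: rest).getD 0 0 : Int) = t from rfl]
    have hm := pvMain sigma_count minthd1 minthd2 rest t t 1
    rw [show (pvBreaks minthd1 (t :: rest)).map (· + 1) ++ [(t :: rest).length] = d from rfl, hd0] at hm
    rw [show pvPairs (0 :: d0 :: d') = (0, d0) :: pvPairs (d0 :: d') from rfl] at hm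
    rw [hm]
    rw [build_intervals_py]
    rw [pvALoop_eq]
    simp
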